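-- pv_equiv track=rewrite | github.com/IvAn190/uNavTools | src/funciones.py | checkSystemFrequency
-- ===== SOURCE A (Python) =====
-- def checkSystemFrequency(sigs):
--     """
--     Checks frequency for each GNSS system to determine if they are using single or dual/multiple frequencies.
--
--     :sigs: [str] contains all selected signals to be processed.
--     """
--     # Diccionario para almacenar las frecuencias especificas utilizadas por cada sistema GNSS
--     system_frequencies = {}
--
--     # Mapear las letras iniciales a los sistemas GNSS.
--     systems = {"G": "GPS", "E": "Galileo", "R": "GLONASS", "B": "BeiDou", "Q": "QZSS", "I": "IRNSS"}
--
--     for sig in sigs: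
--         system_key = sig[0]  # Primera letra del identificador
--         system = systems.get(system_key, "Unknown")
--         frequency_number = sig[2]  # Asume que el tercer carácter indica el numero de la frecuencia
--
--         if system not in system_frequencies:
--             system_frequencies[system] = set()
--
--         system_frequencies[system].add(frequency_number)
--
--     # Determinar si cada sistema utiliza single o dual frequency basado en el numero de frecuencias unicas identificadas.
--     system_usage = {system: "dual-frequency" if len(frequencies) > 1 else "single-frequency"
--                     for system, frequencies in system_frequencies.items()}
--
--     return system_usage
-- ===== SOURCE B (Python) =====
-- def checkSystemFrequency(sigs):
--     """
--     Checks frequency for each GNSS system to determine if they are using single or dual/multiple frequencies.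
--
--     :sigs: [str] contains all selected signals to be processed.
--     """
--     systems = {"G": "GPS", "E": "Galileo", "R": "GLONASS", "B": "BeiDou", "Q": "QZSS", "I": "IRNSS"}
--     first = {}   # first frequency character seen per system
--     usage = {}
--     for sig in sigs:
--         system = systems.get(sig[0], "Unknown")
--         freq = sig[2]
--         if system not in first:
--             first[system] = freq
--             usage[system] = "single-frequency"
--         elif freq != first[system]:
--             usage[system] = "dual-frequency"
--     return usage
-- ===== Notes on version B (the rewrite author's own statement) =====
-- stated objective: simpler
-- what changed: Instead of accumulating a per-system set of frequency characters and classifying all systems in a final dict comprehension, B classifies online in the single pass: it records the first frequency seen per system as 'single-frequency' and flips that entry to 'dual-frequency' the first time a different frequency appears, so no sets and no second pass are built.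
import Mathlib
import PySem

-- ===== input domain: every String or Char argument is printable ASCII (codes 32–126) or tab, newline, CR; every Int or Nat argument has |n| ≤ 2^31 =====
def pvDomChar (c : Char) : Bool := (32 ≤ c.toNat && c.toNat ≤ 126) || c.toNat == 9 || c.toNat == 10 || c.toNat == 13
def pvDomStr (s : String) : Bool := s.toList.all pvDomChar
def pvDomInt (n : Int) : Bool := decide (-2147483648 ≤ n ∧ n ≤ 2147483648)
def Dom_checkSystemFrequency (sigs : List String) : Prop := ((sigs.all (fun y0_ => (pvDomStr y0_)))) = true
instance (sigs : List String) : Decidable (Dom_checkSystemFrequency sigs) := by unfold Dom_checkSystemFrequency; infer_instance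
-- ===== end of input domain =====

-- B classifies each GNSS system online in the single pass (first-frequency + usage dicts)
-- instead of A's per-system frequency sets plus a final classifying comprehension; same values, not faster.


-- ===== PORT A =====
-- shared subexpressions of both Pythons: systems map, sig[0]-keyed system name, sig[2]
def systemsDict : PySem.Dict Char String :=
  PySem.Dict.ofList [('G', "GPS"), ('E', "Galileo"), ('R', "GLONASS"), ('B', "BeiDou"), ('Q', "QZSS"), ('I', "IRNSS")]

def sigSystem (sig : String) : String :=
  systemsDict.getD ((PySem.Str.pyGet? sig 0).getD ' ') "Unknown"   -- sig[0]; ' ' default unreachable under Pre_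

def sigFreq (sig : String) : Char :=
  (PySem.Str.pyGet? sig 2).getD ' '                                -- sig[2]; ' ' default unreachable under Pre_

-- the loop body of A: ensure a set exists for the system, add the frequency character
def stepA (d : PySem.Dict String (PySem.Set Char)) (sig : String) : PySem.Dict String (PySem.Set Char) :=
  d.insert (sigSystem sig) (PySem.Set.add (d.getD (sigSystem sig) PySem.Set.empty) (sigFreq sig))

def checkSystemFrequency (sigs : List String) : List (String × String) :=
  let system_frequencies := sigs.foldl stepA PySem.Dict.empty
  (system_frequencies.items.map
    (fun p => (p.1, if 1 < PySem.Set.len p.2 then "dual-frequency" else "single-frequency")))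

-- ===== PORT B =====
-- the loop body of B: record first frequency / flip to dual-frequency on a different one
def stepB (st : PySem.Dict String Char × PySem.Dict String String) (sig : String) :
    PySem.Dict String Char × PySem.Dict String String :=
  if st.1.contains (sigSystem sig) = false then
    (st.1.insert (sigSystem sig) (sigFreq sig), st.2.insert (sigSystem sig) "single-frequency")
  else if sigFreq sig ≠ st.1.getD (sigSystem sig) ' ' then
    (st.1, st.2.insert (sigSystem sig) "dual-frequency")
  else st

def checkSystemFrequency_alt (sigs : List String) : List (String × String) :=
  (sigs.foldl stepB (PySem.Dict.empty, PySem.Dict.empty)).2.items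

-- ===== PRECONDITION & SPEC =====
-- Pre_ excludes exactly the inputs where Python raises IndexError: a signal shorter than 3
-- characters makes A's sig[2] (or sig[0]) raise, and B raises identically there.
def Pre_checkSystemFrequency (sigs : List String) : Prop :=
  ∀ s ∈ sigs, 3 ≤ PySem.Str.len s
instance (sigs : List String) : Decidable (Pre_checkSystemFrequency sigs) := by
  unfold Pre_checkSystemFrequency; infer_instance

def pvWitness_checkSystemFrequency : List String := ["G01", "G02", "E05", "X11"]

def Spec_checkSystemFrequency (sigs : List String) (out : List (String × String)) : Prop := out = checkSystemFrequency_alt sigs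
instance (sigs : List String) (out : List (String × String)) : Decidable (Spec_checkSystemFrequency sigs out) := by unfold Spec_checkSystemFrequency; infer_instance

-- ===== CLAIM (what is proved, stated in full; the proofs are below) =====
def Claim_equal_checkSystemFrequency : Prop := ∀ (sigs : List String), Dom_checkSystemFrequency sigs → Pre_checkSystemFrequency sigs → Spec_checkSystemFrequency sigs (checkSystemFrequency sigs)

-- ===== LEMMAS AND PROOFS =====

-- classification of one grouped entry, as A's final comprehension computes it
def clfP (p : String × PySem.Set Char) : String × String :=
  (p.1, if 1 < PySem.Set.len p.2 then "dual-frequency" else "single-frequency")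

-- loop invariant tying A's grouping dict to B's (first, usage) pair
def LoopInv (d : PySem.Dict String (PySem.Set Char))
    (st : PySem.Dict String Char × PySem.Dict String String) : Prop :=
  d.keys.Nodup ∧
  st.2.items = d.items.map clfP ∧
  (∀ k, d.get? k = none → st.1.get? k = none) ∧
  (∀ k s, d.get? k = some s → ∃ h t, st.1.get? k = some h ∧ s = h :: t)

theorem loopInv_empty : LoopInv PySem.Dict.empty (PySem.Dict.empty, PySem.Dict.empty) := by
  refine ⟨by simp [PySem.Dict.empty, PySem.Dict.keys], by simp [PySem.Dict.empty], ?_, ?_⟩ <;>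
    intro k <;> simp [PySem.Dict.get?_empty]

theorem keys_eq_of_inv {d st} (h : LoopInv d st) : st.2.keys = d.keys := by
  obtain ⟨-, h2, -, -⟩ := h
  show st.2.items.map Prod.fst = d.items.map Prod.fst
  rw [h2, List.map_map]
  rfl

-- adding a distinct frequency to a non-empty set makes it classify as dual-frequency
theorem len_add_lt {s : PySem.Set Char} {h0 f : Char} {t : List Char}
    (hs : s = h0 :: t) (hne : f ≠ h0) : 1 < PySem.Set.len (PySem.Set.add s f) := by
  subst hs
  unfold PySem.Set.add PySem.Set.len
  split
  · rename_i hcon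
    rcases List.mem_cons.mp (show f ∈ h0 :: t by simpa using hcon) with hm | hm
    · exact absurd hm hne
    · have ht : 0 < t.length := List.length_pos_of_mem hm
      simp only [List.length_cons]
      push_cast
      omega
  · simp only [List.length_append, List.length_cons]
    push_cast
    omega

-- Set.add keeps the head of a non-empty set
theorem add_head {s : PySem.Set Char} {h0 f : Char} {t : List Char}
    (hs : s = h0 :: t) : ∃ t', PySem.Set.add s f = h0 :: t' := by
  subst hs
  unfold PySem.Set.add
  split
  · exact ⟨t, rfl⟩
  · exact ⟨t ++ [f], rfl⟩

theorem loopInv_step (sig : String) {d st} (h : LoopInv d st) : LoopInv (stepA d sig) (stepB st sig) := by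
  obtain ⟨hnd, hit, hn, hs⟩ := h
  have hkeys : st.2.keys = d.keys := keys_eq_of_inv ⟨hnd, hit, hn, hs⟩
  set k := sigSystem sig with hk
  set f := sigFreq sig with hf
  by_cases hc : st.1.contains k = true
  · -- system already seen: d has a set h0 :: t and first has h0
    obtain ⟨h0, hget1⟩ : ∃ h0, st.1.get? k = some h0 := by
      rw [PySem.Dict.contains_eq_isSome_get?] at hc
      exact Option.isSome_iff_exists.mp hc
    obtain ⟨s, hgetd⟩ : ∃ s, d.get? k = some s := by
      cases hd : d.get? k with
      | none => rw [hn k hd] at hget1; cases hget1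
      | some s => exact ⟨s, rfl⟩
    obtain ⟨h0', t, hget1', hst⟩ := hs k s hgetd
    rw [hget1] at hget1'; obtain rfl : h0 = h0' := by injection hget1'
    have hdc : d.contains k = true := by
      rw [PySem.Dict.contains_eq_isSome_get?, hgetd]; rfl
    have hgetD1 : st.1.getD k ' ' = h0 := by
      rw [PySem.Dict.getD_eq_get?_getD, hget1]; rfl
    have hgetDd : d.getD k PySem.Set.empty = s := by
      rw [PySem.Dict.getD_eq_get?_getD, hgetd]; rfl
    have hstepA : stepA d sig = d.insert k (PySem.Set.add s f) := by
      unfold stepA; rw [← hk, ← hf, hgetDd]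
    by_cases hfe : f = h0
    · -- same frequency as the first: both sides leave their state unchanged
      have hadd : PySem.Set.add s f = s := by
        subst hfe hst; unfold PySem.Set.add; simp
      have hA : stepA d sig = d := by
        apply PySem.Dict.ext
        rw [hstepA, hadd, PySem.Dict.items_insert_of_contains d s hdc]
        conv_rhs => rw [← List.map_id' d.items]
        refine List.map_congr_left (fun p hp => ?_)
        obtain ⟨p1, p2⟩ := p
        split
        · rename_i hpk
          have hp1 : p1 = k := by simpa using hpk
          have hgp : d.get? p1 = some p2 := PySem.Dict.get?_of_mem_items _ hp hnd
          rw [hp1, hgetd] at hgp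
          injection hgp with h2
          rw [h2, hp1]
        · rfl
      have hB : stepB st sig = st := by
        unfold stepB
        rw [← hk, ← hf, hgetD1]
        simp [hc, hfe]
      rw [hA, hB]; exact ⟨hnd, hit, hn, hs⟩
    · -- a different frequency: A's set grows past 1, B flips the entry to dual-frequency
      have hB : stepB st sig = (st.1, st.2.insert k "dual-frequency") := by
        unfold stepB
        rw [← hk, ← hf, hgetD1]
        simp [hc, hfe]
      have huc : st.2.contains k = true := by
        rw [PySem.Dict.contains_iff_mem_keys, hkeys]
        exact (PySem.Dict.contains_iff_mem_keys d k).mp hdc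
      refine ⟨?_, ?_, ?_, ?_⟩
      · rw [hstepA]; exact PySem.Dict.nodup_keys_insert d k _ hnd
      · rw [hB, hstepA, PySem.Dict.items_insert_of_contains _ _ huc,
            PySem.Dict.items_insert_of_contains _ _ hdc, hit, List.map_map, List.map_map]
        refine List.map_congr_left (fun p _ => ?_)
        simp only [Function.comp_apply, clfP]
        by_cases hpk : p.1 = k
        · have hlen := len_add_lt hst hfe
          unfold PySem.Set.len at hlen
          simp only [hpk, beq_self_eq_true, if_true, PySem.Set.len]
          rw [if_pos (by exact_mod_cast hlen)]
        · simp [hpk]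
      · intro k' hk'
        rw [hstepA, PySem.Dict.get?_insert] at hk'
        rw [hB]
        split at hk'
        · cases hk'
        · exact hn k' hk'
      · intro k' s' hk'
        rw [hstepA, PySem.Dict.get?_insert] at hk'
        rw [hB]
        split at hk'
        · rename_i hkk; subst hkk
          obtain ⟨rfl⟩ : PySem.Set.add s f = s' := by injection hk'
          obtain ⟨t', ht'⟩ := add_head (f := f) hst
          exact ⟨h0, t', hget1, ht'⟩
        · exact hs k' s' hk'
  · -- system unseen: d gets a singleton set, B records single-frequency
    have hc' : st.1.contains k = false := by simpa using hc
    have hget1 : st.1.get? k = none := by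
      rw [PySem.Dict.contains_eq_isSome_get?] at hc'
      exact Option.not_isSome_iff_eq_none.mp (by simp [hc'])
    have hgetd : d.get? k = none := by
      cases hd : d.get? k with
      | none => rfl
      | some s => obtain ⟨h0, t, h1, -⟩ := hs k s hd; rw [hget1] at h1; cases h1
    have hdc : d.contains k = false := by
      rw [PySem.Dict.contains_eq_isSome_get?, hgetd]; rfl
    have huc : st.2.contains k = false := by
      by_contra hcc
      have : k ∈ d.keys := by
        rw [← hkeys]
        exact (PySem.Dict.contains_iff_mem_keys st.2 k).mp (by simpa using hcc)
      rw [← PySem.Dict.contains_iff_mem_keys] at this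
      rw [this] at hdc; cases hdc
    have hstepA : stepA d sig = d.insert k [f] := by
      unfold stepA
      rw [← hk, ← hf, PySem.Dict.getD_of_get?_eq_none _ _ hgetd]
      rfl
    have hB : stepB st sig = (st.1.insert k f, st.2.insert k "single-frequency") := by
      unfold stepB
      rw [← hk, ← hf]
      simp [hc']
    refine ⟨?_, ?_, ?_, ?_⟩
    · rw [hstepA]; exact PySem.Dict.nodup_keys_insert d k _ hnd
    · rw [hB, hstepA, PySem.Dict.items_insert_of_not_contains _ _ huc,
          PySem.Dict.items_insert_of_not_contains _ _ hdc, List.map_append, hit]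
      rfl
    · intro k' hk'
      rw [hstepA, PySem.Dict.get?_insert] at hk'
      rw [hB]
      simp only [PySem.Dict.get?_insert]
      split at hk'
      · cases hk'
      · rename_i hne
        rw [if_neg hne]
        exact hn k' hk'
    · intro k' s' hk'
      rw [hstepA, PySem.Dict.get?_insert] at hk'
      rw [hB]
      split at hk'
      · rename_i hkk; subst hkk
        obtain rfl : ([f] : PySem.Set Char) = s' := by injection hk'
        exact ⟨f, [], by rw [PySem.Dict.get?_insert]; simp, rfl⟩
      · obtain ⟨h0, t, h1, h2⟩ := hs k' s' hk'
        refine ⟨h0, t, ?_, h2⟩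
        rw [PySem.Dict.get?_insert]
        rename_i hne
        rw [if_neg hne]; exact h1

theorem fold_eq {sigs : List String} :
    ∀ {d st}, LoopInv d st →
      (sigs.foldl stepB st).2.items = (sigs.foldl stepA d).items.map clfP := by
  induction sigs with
  | nil => intro d st h; exact h.2.1
  | cons sig rest ih => intro d st h; exact ih (loopInv_step sig h)

-- ===== VERDICT (by name: the statement is the Claim_ definition above) =====
theorem checkSystemFrequency_spec : Claim_equal_checkSystemFrequency := by
  intro sigs _ _
  show checkSystemFrequency sigs = checkSystemFrequency_alt sigs
  unfold checkSystemFrequency checkSystemFrequency_alt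
  exact (fold_eq loopInv_empty).symm
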